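-- pv_equiv track=rewrite | github.com/davidiach/erdos97 | src/erdos97/incidence_filters.py | crossing_bisector_violations
-- ===== SOURCE A (Python) =====
-- from itertools import combinations
-- from typing import Sequence
--
-- Chord = tuple[int, int]
--
-- def normalize_chord(a: int, b: int) -> Chord:
--     """Return a sorted unordered chord tuple. Reject loops."""
--     if a == b:
--         raise ValueError(f"loop chord is not allowed: ({a}, {b})")
--     return (a, b) if a < b else (b, a)
--
-- def phi_map(S: Sequence[Sequence[int]]) -> dict[Chord, Chord]:
--     """
--     Return phi({i,j}) = S_i cap S_j whenever the intersection has size 2.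
--
--     Chords are normalized sorted tuples.
--     """
--     witness_sets = [set(row) for row in S]
--     out: dict[Chord, Chord] = {}
--     for i, j in combinations(range(len(S)), 2):
--         inter = sorted(witness_sets[i] & witness_sets[j])
--         if len(inter) == 2:
--             out[normalize_chord(i, j)] = normalize_chord(inter[0], inter[1])
--     return out
--
-- def _positions(order: Sequence[int]) -> dict[int, int]:
--     pos: dict[int, int] = {}
--     for idx, label in enumerate(order):
--         if label in pos:
--             raise ValueError(f"cyclic order is not a permutation: repeated label {label}")
--         pos[label] = idx
--     return pos
--
-- def chords_cross_in_order(e: Chord, f: Chord, order: Sequence[int]) -> bool: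
--     """
--     Return True iff disjoint chords e and f have alternating endpoints.
--
--     The supplied order is a cyclic order of labels. Chords sharing an endpoint
--     return False.
--     """
--     e = normalize_chord(*e)
--     f = normalize_chord(*f)
--     if set(e) & set(f):
--         return False
--
--     pos = _positions(order)
--     missing = [label for label in (*e, *f) if label not in pos]
--     if missing:
--         raise ValueError(f"chord endpoint is missing from cyclic order: {missing[0]}")
--
--     a, b = e
--     c, d = f
--     a_pos, b_pos = pos[a], pos[b]
--     if a_pos > b_pos:
--         a_pos, b_pos = b_pos, a_pos
--     c_inside = a_pos < pos[c] < b_pos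
--     d_inside = a_pos < pos[d] < b_pos
--     return c_inside != d_inside
--
-- def crossing_bisector_violations(
--     S: Sequence[Sequence[int]],
--     order: Sequence[int],
-- ) -> list[tuple[Chord, Chord]]:
--     """Return phi edges e -> f where e and f do not cross in the supplied order."""
--     violations: list[tuple[Chord, Chord]] = []
--     for source, target in sorted(phi_map(S).items()):
--         if not chords_cross_in_order(source, target, order):
--             violations.append((source, target))
--     return violations
-- ===== SOURCE B (Python) =====
-- from typing import Sequence
--
-- Chord = tuple[int, int]
--
--
-- def _fails_to_cross(e: Chord, f: Chord, order: Sequence[int]) -> bool: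
--     """True iff normalized disjoint chords e, f do NOT alternate in the cyclic order."""
--     a, b = e
--     c, d = f
--     if a == c or a == d or b == c or b == d:
--         return True
--     pos: dict[int, int] = {}
--     for idx, label in enumerate(order):
--         if label in pos:
--             raise ValueError(f"cyclic order is not a permutation: repeated label {label}")
--         pos[label] = idx
--     for label in (a, b, c, d):
--         if label not in pos:
--             raise ValueError(f"chord endpoint is missing from cyclic order: {label}")
--     lo, hi = min(pos[a], pos[b]), max(pos[a], pos[b])
--     c_inside = lo < pos[c] < hi
--     d_inside = lo < pos[d] < hi
--     return c_inside == d_inside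
--
--
-- def crossing_bisector_violations(
--     S: Sequence[Sequence[int]],
--     order: Sequence[int],
-- ) -> list[tuple[Chord, Chord]]:
--     """Return phi edges e -> f where e and f do not cross in the supplied order."""
--     # Inverted index: no pairwise set intersections.  occ maps each label to the
--     # (increasing) list of set indices containing it; walking the labels in sorted
--     # order distributes each label to every pair of sets sharing it, so shared[(i, j)]
--     # ends up as the sorted intersection of witness sets i and j.
--     occ: dict[int, list[int]] = {}
--     for i, row in enumerate(S):
--         for x in set(row):
--             occ.setdefault(x, []).append(i)
--     shared: dict[Chord, list[int]] = {}
--     for x in sorted(occ):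
--         idxs = occ[x]
--         for a in range(len(idxs)):
--             for b in range(a + 1, len(idxs)):
--                 shared.setdefault((idxs[a], idxs[b]), []).append(x)
--     violations: list[tuple[Chord, Chord]] = []
--     for (i, j), labels in sorted(shared.items()):
--         if len(labels) == 2 and _fails_to_cross((i, j), (labels[0], labels[1]), order):
--             violations.append(((i, j), (labels[0], labels[1])))
--     return violations
-- ===== Notes on version B (the rewrite author's own statement) =====
-- stated objective: alternative
-- what changed: B replaces phi_map's pairwise set intersections with an inverted index: one pass builds label -> list of set indices, each label is then distributed to every pair of sets sharing it (accumulating per-pair shared-label lists in a dict), and pairs with exactly two shared labels are filtered with the crossing test; no combinations loop, no set intersection and no per-pair sort are performed.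
import Mathlib
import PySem

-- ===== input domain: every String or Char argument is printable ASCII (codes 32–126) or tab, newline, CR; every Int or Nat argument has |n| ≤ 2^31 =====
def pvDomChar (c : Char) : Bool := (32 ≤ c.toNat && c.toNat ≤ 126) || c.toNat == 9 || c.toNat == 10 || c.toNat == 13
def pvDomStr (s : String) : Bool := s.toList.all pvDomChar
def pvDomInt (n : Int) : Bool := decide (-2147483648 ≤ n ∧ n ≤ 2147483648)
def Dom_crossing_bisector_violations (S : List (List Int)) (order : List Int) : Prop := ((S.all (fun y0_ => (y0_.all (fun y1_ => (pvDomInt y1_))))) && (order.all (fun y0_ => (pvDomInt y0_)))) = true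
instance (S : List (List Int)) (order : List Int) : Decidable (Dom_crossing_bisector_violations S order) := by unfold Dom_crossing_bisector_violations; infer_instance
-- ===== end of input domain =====

-- B replaces phi_map's pairwise set intersections with an inverted index: one pass builds
-- label -> list of set indices, each label is distributed to every pair of sets sharing it,
-- and pairs with exactly two shared labels are filtered with the crossing test
-- (objective: alternative algorithm — no combinations loop, no set intersection, no per-pair sort).

-- ===== PORT A =====
-- normalize_chord: none = the ValueError on a loop chord
def pvNormChordA (a b : Int) : Option (Int × Int) :=
  if a == b then none
  else if a < b then some (a, b) else some (b, a)

-- phi_map; an Option threads the (unreachable) ValueError of normalize_chord through the loop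
def pvPhiMapA (S : List (List Int)) : Option (PySem.Dict (Int × Int) (Int × Int)) :=
  let ws := S.map (fun row => PySem.Set.ofList row)
  (PySem.List.combinations (PySem.List.pyRange 0 (S.length : Int)) 2).foldl
    (fun od pr => od.bind (fun d =>
      match pr with
      | [i, j] =>
        -- indices from range(len(S)) are always in bounds, so pyGetD's default is never read
        let inter := PySem.List.sorted
          (PySem.Set.inter (PySem.List.pyGetD ws i []) (PySem.List.pyGetD ws j [])) (fun x => x)
        if inter.length = 2 then
          match pvNormChordA i j, pvNormChordA (PySem.List.pyGetD inter 0 0) (PySem.List.pyGetD inter 1 0) with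
          | some k, some v => some (d.insert k v)
          | _, _ => none
        else some d
      | _ => some d))  -- combinations(…, 2) only yields 2-element lists
    (some PySem.Dict.empty)

-- _positions: none = the ValueError on a repeated label
def pvPositionsA (order : List Int) : Option (PySem.Dict Int Int) :=
  (PySem.List.enumerate order).foldl
    (fun opos p => opos.bind (fun pos =>
      if pos.contains p.2 then none else some (pos.insert p.2 p.1)))
    (some PySem.Dict.empty)

-- chords_cross_in_order: none = a ValueError (repeated label / missing endpoint)
def pvChordsCrossA (e f : Int × Int) (order : List Int) : Option Bool :=
  (pvNormChordA e.1 e.2).bind fun e =>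
  (pvNormChordA f.1 f.2).bind fun f =>
  -- 'if set(e) & set(f):' — truthiness of the intersection = nonemptiness
  if PySem.Set.inter (PySem.Set.ofList [e.1, e.2]) (PySem.Set.ofList [f.1, f.2]) ≠ [] then some false
  else
    (pvPositionsA order).bind fun pos =>
    let missing := [e.1, e.2, f.1, f.2].filter (fun l => !pos.contains l)
    if missing ≠ [] then none
    else
      -- all four keys are present, so getD's default is never read
      let ap0 := pos.getD e.1 0
      let bp0 := pos.getD e.2 0
      let ap := if ap0 > bp0 then bp0 else ap0
      let bp := if ap0 > bp0 then ap0 else bp0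
      let ci := ap < pos.getD f.1 0 ∧ pos.getD f.1 0 < bp
      let di := ap < pos.getD f.2 0 ∧ pos.getD f.2 0 < bp
      some (decide (ci ≠ di))

def crossing_bisector_violations (S : List (List Int)) (order : List Int) : List ((Int × Int) × (Int × Int)) :=
  match pvPhiMapA S with
  | none => []  -- unreachable: phi_map never raises
  | some phi =>
    -- sorted(phi.items()): the keys are distinct, so Python's tuple comparison never reaches
    -- the values; sorting by the key under the lexicographic order is exact
    ((PySem.List.sorted phi.items (fun p => (toLex p.1 : Lex (Int × Int)))).foldl
      (fun oacc p => oacc.bind fun acc =>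
        (pvChordsCrossA p.1 p.2 order).map (fun cr => if cr then acc else acc ++ [p]))
      (some [])).getD []

-- ===== PORT B =====
-- B's position-building loop (the same dict loop A's _positions runs); none = the ValueError
def pvPositionsB (order : List Int) : Option (PySem.Dict Int Int) :=
  (PySem.List.enumerate order).foldl
    (fun opos p => opos.bind (fun pos =>
      if pos.contains p.2 then none else some (pos.insert p.2 p.1)))
    (some PySem.Dict.empty)

-- _fails_to_cross: none = a ValueError (repeated label / missing endpoint)
def pvFailsToCrossB (e f : Int × Int) (order : List Int) : Option Bool :=
  if e.1 = f.1 ∨ e.1 = f.2 ∨ e.2 = f.1 ∨ e.2 = f.2 then some true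
  else
    (pvPositionsB order).bind fun pos =>
    if [e.1, e.2, f.1, f.2].all (fun l => pos.contains l) then
      -- all four keys are present, so getD's default is never read
      let lo := min (pos.getD e.1 0) (pos.getD e.2 0)
      let hi := max (pos.getD e.1 0) (pos.getD e.2 0)
      some (decide ((lo < pos.getD f.1 0 ∧ pos.getD f.1 0 < hi) ↔ (lo < pos.getD f.2 0 ∧ pos.getD f.2 0 < hi)))
    else none

-- the inverted index: occ maps each label to the (increasing) list of set indices containing it
def pvOccB (S : List (List Int)) : PySem.Dict Int (List Int) :=
  (PySem.List.enumerate S).foldl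
    (fun occ p => (PySem.Set.ofList p.2).foldl
      (fun occ x => occ.modify x [] (fun l => l ++ [p.1])) occ)
    PySem.Dict.empty

-- shared: walking the labels in sorted order, distribute each label to every pair of sets sharing it
def pvSharedB (S : List (List Int)) : PySem.Dict (Int × Int) (List Int) :=
  let occ := pvOccB S
  (PySem.List.sorted occ.keys (fun x => x)).foldl
    (fun sh x =>
      let idxs := occ.getD x []
      (PySem.List.pyRange 0 (idxs.length : Int)).foldl (fun sh a =>
        (PySem.List.pyRange (a + 1) (idxs.length : Int)).foldl (fun sh b =>
          sh.modify (PySem.List.pyGetD idxs a 0, PySem.List.pyGetD idxs b 0) [] (fun l => l ++ [x])) sh) sh)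
    PySem.Dict.empty

def crossing_bisector_violations_alt (S : List (List Int)) (order : List Int) : List ((Int × Int) × (Int × Int)) :=
  let shared := pvSharedB S
  -- sorted(shared.items()): keys are distinct, so the label lists are never compared
  ((PySem.List.sorted shared.items (fun p => (toLex p.1 : Lex (Int × Int)))).foldl
    (fun oacc p => oacc.bind fun acc =>
      if p.2.length = 2 then
        (pvFailsToCrossB p.1 (PySem.List.pyGetD p.2 0 0, PySem.List.pyGetD p.2 1 0) order).map
          (fun fl => if fl then acc ++ [(p.1, (PySem.List.pyGetD p.2 0 0, PySem.List.pyGetD p.2 1 0))] else acc)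
      else some acc)
    (some [])).getD []

-- ===== PRECONDITION & SPEC =====
-- the distinct labels common to rows i and j (what phi's intersection test sees)
def pvCommon (S : List (List Int)) (i j : Nat) : List Int :=
  ((S.getD i []).filter (fun x => decide (x ∈ S.getD j []))).dedup

-- Pre_ excludes exactly the inputs on which A raises ValueError: some pair of witness sets
-- shares exactly two labels, the two chords are disjoint, and the cyclic order has a repeated
-- label or misses one of the four endpoints.
def Pre_crossing_bisector_violations (S : List (List Int)) (order : List Int) : Prop :=
  ∀ i ∈ List.range S.length, ∀ j ∈ List.range S.length, i < j →
    (pvCommon S i j).length = 2 →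
    ((i : Int) ∈ pvCommon S i j ∨ (j : Int) ∈ pvCommon S i j) ∨
      (order.Nodup ∧ (i : Int) ∈ order ∧ (j : Int) ∈ order ∧ ∀ x ∈ pvCommon S i j, x ∈ order)
instance (S : List (List Int)) (order : List Int) : Decidable (Pre_crossing_bisector_violations S order) := by
  unfold Pre_crossing_bisector_violations; infer_instance

def pvWitness_crossing_bisector_violations : List (List Int) × List Int :=
  ([[1, 2], [2, 1, 1]], [0, 3])

def Spec_crossing_bisector_violations (S : List (List Int)) (order : List Int) (out : List ((Int × Int) × (Int × Int))) : Prop := out = crossing_bisector_violations_alt S order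
instance (S : List (List Int)) (order : List Int) (out : List ((Int × Int) × (Int × Int))) : Decidable (Spec_crossing_bisector_violations S order out) := by unfold Spec_crossing_bisector_violations; infer_instance

-- ===== CLAIM (what is proved, stated in full; the proofs are below) =====
def Claim_equal_crossing_bisector_violations : Prop := ∀ (S : List (List Int)) (order : List Int), Dom_crossing_bisector_violations S order → Pre_crossing_bisector_violations S order → Spec_crossing_bisector_violations S order (crossing_bisector_violations S order)

-- ===== LEMMAS AND PROOFS =====

-- the sorted per-pair intersection A computes for the pair (i, j)
def pvInterA (S : List (List Int)) (i j : Int) : List Int :=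
  PySem.List.sorted
    (PySem.Set.inter
      (PySem.List.pyGetD (S.map (fun row => PySem.Set.ofList row)) i [])
      (PySem.List.pyGetD (S.map (fun row => PySem.Set.ofList row)) j [])) (fun x => x)

-- the phi entry A records for the pair (i, j), if any
def pvEnt (S : List (List Int)) (i j : Int) : Option ((Int × Int) × (Int × Int)) :=
  if (pvInterA S i j).length = 2 then
    some ((i, j), (PySem.List.pyGetD (pvInterA S i j) 0 0, PySem.List.pyGetD (pvInterA S i j) 1 0))
  else none

-- all phi entries for pairs (i, j) with a ≤ i < j < |S|, in lexicographic pair order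
def pvEntList (S : List (List Int)) (a : Int) : List ((Int × Int) × (Int × Int)) :=
  (PySem.List.pyRange a (S.length : Int)).flatMap
    (fun i => (PySem.List.pyRange (i + 1) (S.length : Int)).filterMap (pvEnt S i))

-- the step of A's final filtering loop
def pvEntStep (order : List Int) (oacc : Option (List ((Int × Int) × (Int × Int))))
    (p : (Int × Int) × (Int × Int)) : Option (List ((Int × Int) × (Int × Int))) :=
  oacc.bind fun acc => (pvChordsCrossA p.1 p.2 order).map (fun cr => if cr then acc else acc ++ [p])

-- the step of A's phi_map loop (pvPhiMapA is literally a fold of this step)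
def pvStepA (S : List (List Int)) (od : Option (PySem.Dict (Int × Int) (Int × Int)))
    (pr : List Int) : Option (PySem.Dict (Int × Int) (Int × Int)) :=
  od.bind (fun d =>
    match pr with
    | [i, j] =>
      let inter := PySem.List.sorted
        (PySem.Set.inter
          (PySem.List.pyGetD (S.map (fun row => PySem.Set.ofList row)) i [])
          (PySem.List.pyGetD (S.map (fun row => PySem.Set.ofList row)) j [])) (fun x => x)
      if inter.length = 2 then
        match pvNormChordA i j, pvNormChordA (PySem.List.pyGetD inter 0 0) (PySem.List.pyGetD inter 1 0) with
        | some k, some v => some (d.insert k v)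
        | _, _ => none
      else some d
    | _ => some d)

theorem pv_comb2_foldl {β : Type} (G : β → List Int → β) (a n : Int) (init : β) :
    (PySem.List.combinations (PySem.List.pyRange a n) 2).foldl G init
      = (PySem.List.pyRange a n).foldl
          (fun st i => (PySem.List.pyRange (i + 1) n).foldl (fun st j => G st [i, j]) st) init := by
  by_cases h : a < n
  · rw [PySem.List.pyRange_one_cons h]
    show (PySem.List.combinations (a :: PySem.List.pyRange (a + 1) n) (1 + 1)).foldl G init = _
    rw [PySem.List.combinations_cons_succ, PySem.List.combinations_one, List.foldl_append,
      List.map_map, List.foldl_map, List.foldl_cons]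
    exact pv_comb2_foldl G (a + 1) n _
  · rw [PySem.List.pyRange_one_eq_nil (by omega)]; rfl
termination_by (n - a).toNat
decreasing_by omega

theorem pv_pyRange_pairwise (a n : Int) : List.Pairwise (· < ·) (PySem.List.pyRange a n) := by
  by_cases h : a < n
  · rw [PySem.List.pyRange_one_cons h]
    refine List.Pairwise.cons ?_ (pv_pyRange_pairwise (a + 1) n)
    intro b hb; rw [PySem.List.mem_pyRange_one] at hb; omega
  · rw [PySem.List.pyRange_one_eq_nil (by omega)]; constructor
termination_by (n - a).toNat
decreasing_by omega

theorem pv_strict_sorted_eq (l₁ l₂ : List Int) (h₁ : List.Pairwise (· < ·) l₁)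
    (h₂ : List.Pairwise (· < ·) l₂) (h : ∀ z, z ∈ l₁ ↔ z ∈ l₂) : l₁ = l₂ := by
  have n₁ : l₁.Nodup := h₁.imp ne_of_lt
  have n₂ : l₂.Nodup := h₂.imp ne_of_lt
  have hp : l₁.Perm l₂ := (List.perm_ext_iff_of_nodup n₁ n₂).mpr h
  exact List.Perm.eq_of_pairwise (fun a b _ _ hab hba => le_antisymm hab hba)
    (h₁.imp le_of_lt) (h₂.imp le_of_lt) hp

theorem pv_ws_getD (S : List (List Int)) (i : Int) :
    PySem.List.pyGetD (S.map (fun row => PySem.Set.ofList row)) i []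
      = PySem.Set.ofList (PySem.List.pyGetD S i []) := by
  simpa using PySem.List.pyGetD_map (fun row => PySem.Set.ofList row) S i []

theorem pv_sorted_strict (l : List Int) (hn : l.Nodup) :
    List.Pairwise (· < ·) (PySem.List.sorted l (fun x => x)) := by
  have hpw := PySem.List.sorted_pairwise l (fun x => x)
  have hnd : (PySem.List.sorted l (fun x => x) : List Int).Nodup :=
    (PySem.List.sorted_perm l (fun x => x) false).nodup_iff.mpr hn
  exact (hpw.and hnd).imp (fun h => lt_of_le_of_ne h.1 h.2)

theorem pv_interA_pairwise (S : List (List Int)) (i j : Int) :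
    List.Pairwise (· < ·) (pvInterA S i j) := by
  unfold pvInterA
  refine pv_sorted_strict _ ?_
  rw [pv_ws_getD]
  exact PySem.Set.nodup_inter _ _ (PySem.Set.nodup_ofList _)

theorem pv_interA_mem (S : List (List Int)) (i j : Int) (z : Int) :
    z ∈ pvInterA S i j ↔ z ∈ PySem.List.pyGetD S i [] ∧ z ∈ PySem.List.pyGetD S j [] := by
  unfold pvInterA
  rw [(PySem.List.sorted_perm _ _ false).mem_iff, pv_ws_getD, pv_ws_getD,
    PySem.Set.mem_inter, PySem.Set.mem_ofList, PySem.Set.mem_ofList]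

theorem pv_getD2_lt (l : List Int) (h : List.Pairwise (· < ·) l) (h2 : l.length = 2) :
    PySem.List.pyGetD l 0 0 < PySem.List.pyGetD l 1 0 := by
  match l, h2 with
  | [a, b], _ => simp [PySem.List.pyGetD] at *; omega

theorem pv_cross_eq (i j x y : Int) (order : List Int) (hij : i < j) (hxy : x < y) :
    pvFailsToCrossB (i, j) (x, y) order
      = (pvChordsCrossA (i, j) (x, y) order).map (fun b => !b) := by
  have hni : pvNormChordA i j = some (i, j) := by
    simp [pvNormChordA, hij, hij.ne]
  have hnx : pvNormChordA x y = some (x, y) := by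
    simp [pvNormChordA, hxy, hxy.ne]
  have hPB : pvPositionsB = pvPositionsA := rfl
  unfold pvFailsToCrossB pvChordsCrossA
  rw [hPB]
  simp only [hni, hnx, Option.bind_some]
  by_cases hd : i = x ∨ i = y ∨ j = x ∨ j = y
  · rw [if_pos hd]
    have hne : PySem.Set.inter (PySem.Set.ofList [i, j]) (PySem.Set.ofList [x, y]) ≠ [] := by
      obtain ⟨z, hz1, hz2⟩ : ∃ z, z ∈ [i, j] ∧ z ∈ [x, y] := by
        rcases hd with h | h | h | h
        exacts [⟨i, by simp, by simp [h]⟩, ⟨i, by simp, by simp [h]⟩,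
          ⟨j, by simp, by simp [h]⟩, ⟨j, by simp, by simp [h]⟩]
      intro hnil
      have hzm : z ∈ PySem.Set.inter (PySem.Set.ofList [i, j]) (PySem.Set.ofList [x, y]) :=
        (PySem.Set.mem_inter _ _ _).mpr
          ⟨(PySem.Set.mem_ofList _ _).mpr hz1, (PySem.Set.mem_ofList _ _).mpr hz2⟩
      rw [hnil] at hzm
      simp at hzm
    rw [if_pos hne]
    rfl
  · rw [if_neg hd]
    have heq : PySem.Set.inter (PySem.Set.ofList [i, j]) (PySem.Set.ofList [x, y]) = [] := by
      rw [List.eq_nil_iff_forall_not_mem]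
      intro z hz
      rw [PySem.Set.mem_inter, PySem.Set.mem_ofList, PySem.Set.mem_ofList] at hz
      obtain ⟨h1, h2⟩ := hz
      simp at h1 h2
      rcases h1 with rfl | rfl <;> rcases h2 with rfl | rfl <;> tauto
    rw [if_neg (by simpa using heq)]
    cases hpos : pvPositionsA order with
    | none => simp
    | some pos =>
      simp only [Option.bind_some]
      by_cases hall : ([i, j, x, y].all (fun l => pos.contains l)) = true
      · rw [if_pos hall]
        have hmiss : ([i, j, x, y].filter (fun l => !pos.contains l)) = [] := by
          rw [List.filter_eq_nil_iff]
          intro a ha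
          simp only [List.all_eq_true] at hall
          simp [hall a ha]
        rw [if_neg (by simpa using hmiss)]
        simp only [Option.map_some]
        congr 1
        have hmin : (if pos.getD i 0 > pos.getD j 0 then pos.getD j 0 else pos.getD i 0)
            = min (pos.getD i 0) (pos.getD j 0) := by rw [min_def]; split_ifs <;> omega
        have hmax : (if pos.getD i 0 > pos.getD j 0 then pos.getD i 0 else pos.getD j 0)
            = max (pos.getD i 0) (pos.getD j 0) := by rw [max_def]; split_ifs <;> omega
        rw [hmin, hmax]
        set lo := min (pos.getD i 0) (pos.getD j 0)
        set hi := max (pos.getD i 0) (pos.getD j 0)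
        by_cases hc : lo < pos.getD x 0 ∧ pos.getD x 0 < hi <;>
          by_cases hdd : lo < pos.getD y 0 ∧ pos.getD y 0 < hi <;>
            simp [hc, hdd]
      · rw [if_neg hall]
        have hmiss : ([i, j, x, y].filter (fun l => !pos.contains l)) ≠ [] := by
          intro hnil
          rw [List.filter_eq_nil_iff] at hnil
          apply hall
          simp only [List.all_eq_true]
          intro a ha
          simpa using hnil a ha
        rw [if_pos (by simpa using hmiss)]
        simp

theorem pv_ent_shape (S : List (List Int)) (i j : Int) (p : (Int × Int) × (Int × Int))
    (h : pvEnt S i j = some p) : p.1 = (i, j) := by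
  unfold pvEnt at h
  split at h
  · cases h; rfl
  · cases h

theorem pv_stepA_some (S : List (List Int)) (d : PySem.Dict (Int × Int) (Int × Int)) (i j : Int)
    (hij : i < j) :
    pvStepA S (some d) [i, j]
      = some (match pvEnt S i j with | some p => d.insert p.1 p.2 | none => d) := by
  show (if (pvInterA S i j).length = 2 then
      match pvNormChordA i j,
        pvNormChordA (PySem.List.pyGetD (pvInterA S i j) 0 0) (PySem.List.pyGetD (pvInterA S i j) 1 0) with
      | some k, some v => some (d.insert k v)
      | _, _ => none
    else some d) = _
  unfold pvEnt
  by_cases h : (pvInterA S i j).length = 2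
  · rw [if_pos h, if_pos h]
    have h01 := pv_getD2_lt _ (pv_interA_pairwise S i j) h
    have hn1 : pvNormChordA i j = some (i, j) := by simp [pvNormChordA, hij, hij.ne]
    have hn2 : pvNormChordA (PySem.List.pyGetD (pvInterA S i j) 0 0) (PySem.List.pyGetD (pvInterA S i j) 1 0)
        = some (PySem.List.pyGetD (pvInterA S i j) 0 0, PySem.List.pyGetD (pvInterA S i j) 1 0) := by
      simp [pvNormChordA, h01, h01.ne]
    rw [hn1, hn2]
  · rw [if_neg h, if_neg h]

theorem pv_phi_inner (S : List (List Int)) (i b : Int) (hib : i < b)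
    (d : PySem.Dict (Int × Int) (Int × Int))
    (hkeys : ∀ k ∈ d.keys, k.1 < i ∨ (k.1 = i ∧ k.2 < b)) :
    ∃ d', (PySem.List.pyRange b (S.length : Int)).foldl (fun st j => pvStepA S st [i, j]) (some d) = some d'
      ∧ d'.items = d.items ++ (PySem.List.pyRange b (S.length : Int)).filterMap (pvEnt S i) := by
  by_cases hbn : b < (S.length : Int)
  · rw [PySem.List.pyRange_one_cons hbn, List.foldl_cons, List.filterMap_cons,
      pv_stepA_some S d i b hib]
    cases hent : pvEnt S i b with
    | none =>
      obtain ⟨d', h1, h2⟩ := pv_phi_inner S i (b + 1) (by omega) d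
        (fun k hk => by
          rcases hkeys k hk with h | h
          · exact Or.inl h
          · exact Or.inr ⟨h.1, by omega⟩)
      exact ⟨d', h1, h2⟩
    | some p =>
      have hp1 : p.1 = (i, b) := pv_ent_shape S i b p hent
      have hcont : d.contains p.1 = false := by
        rw [hp1]
        by_contra hc
        have := (PySem.Dict.contains_iff_mem_keys d (i, b)).mp (by
          cases hcc : d.contains (i, b)
          · exact absurd hcc hc
          · rfl)
        have hfalse := hkeys _ this
        simp at hfalse
      have hitems : (d.insert p.1 p.2).items = d.items ++ [p] := by
        rw [PySem.Dict.items_insert_of_not_contains d p.2 hcont]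
      have hkeys2 : ∀ k ∈ (d.insert p.1 p.2).keys, k.1 < i ∨ (k.1 = i ∧ k.2 < b + 1) := by
        intro k hk
        have : k ∈ (d.insert p.1 p.2).items.map Prod.fst := hk
        rw [hitems, List.map_append] at this
        rcases List.mem_append.mp this with h | h
        · rcases hkeys k h with h' | h'
          · exact Or.inl h'
          · exact Or.inr ⟨h'.1, by omega⟩
        · simp at h
          rw [h, hp1]
          exact Or.inr ⟨rfl, by omega⟩
      obtain ⟨d', h1, h2⟩ := pv_phi_inner S i (b + 1) (by omega) (d.insert p.1 p.2) hkeys2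
      refine ⟨d', h1, ?_⟩
      rw [h2, hitems]
      simp
  · rw [PySem.List.pyRange_one_eq_nil (by omega)]
    exact ⟨d, rfl, by simp⟩
termination_by ((S.length : Int) - b).toNat
decreasing_by all_goals simp_wf; omega

theorem pv_phi_outer (S : List (List Int)) (a : Int) (d : PySem.Dict (Int × Int) (Int × Int))
    (hkeys : ∀ k ∈ d.keys, k.1 < a) :
    ∃ d', (PySem.List.pyRange a (S.length : Int)).foldl
        (fun st i => (PySem.List.pyRange (i + 1) (S.length : Int)).foldl (fun st j => pvStepA S st [i, j]) st)
        (some d) = some d'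
      ∧ d'.items = d.items ++ pvEntList S a := by
  by_cases han : a < (S.length : Int)
  · rw [PySem.List.pyRange_one_cons han, List.foldl_cons]
    obtain ⟨d₂, hi1, hi2⟩ := pv_phi_inner S a (a + 1) (by omega) d
      (fun k hk => Or.inl (hkeys k hk))
    rw [hi1]
    have hkeys2 : ∀ k ∈ d₂.keys, k.1 < a + 1 := by
      intro k hk
      have : k ∈ d₂.items.map Prod.fst := hk
      rw [hi2, List.map_append] at this
      rcases List.mem_append.mp this with h | h
      · have := hkeys k h; omega
      · obtain ⟨p, hp, rfl⟩ := List.mem_map.mp h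
        obtain ⟨jj, hjj, hent⟩ := List.mem_filterMap.mp hp
        rw [pv_ent_shape S a jj p hent]
        omega
    obtain ⟨d', h1, h2⟩ := pv_phi_outer S (a + 1) d₂ hkeys2
    refine ⟨d', h1, ?_⟩
    rw [h2, hi2]
    unfold pvEntList
    rw [PySem.List.pyRange_one_cons han, List.flatMap_cons, List.append_assoc]
  · rw [PySem.List.pyRange_one_eq_nil (by omega)]
    refine ⟨d, rfl, ?_⟩
    unfold pvEntList
    rw [PySem.List.pyRange_one_eq_nil (by omega)]
    simp
termination_by ((S.length : Int) - a).toNat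
decreasing_by all_goals simp_wf; omega

theorem pv_phi_items (S : List (List Int)) :
    ∃ phi, pvPhiMapA S = some phi ∧ phi.items = pvEntList S 0 := by
  have h0 : pvPhiMapA S
      = (PySem.List.combinations (PySem.List.pyRange 0 (S.length : Int)) 2).foldl (pvStepA S)
          (some PySem.Dict.empty) := rfl
  rw [h0, pv_comb2_foldl]
  obtain ⟨d', h1, h2⟩ := pv_phi_outer S 0 PySem.Dict.empty (by simp)
  exact ⟨d', h1, by simpa using h2⟩

theorem pv_entList_key_mem (S : List (List Int)) (a : Int) :
    ∀ p ∈ pvEntList S a, a ≤ p.1.1 ∧ p.1.1 < p.1.2 := by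
  intro p hp
  obtain ⟨i, hi, hp2⟩ := List.mem_flatMap.mp hp
  obtain ⟨j, hj, hent⟩ := List.mem_filterMap.mp hp2
  rw [PySem.List.mem_pyRange_one] at hi hj
  rw [pv_ent_shape S i j p hent]
  simp only
  omega

theorem pv_entList_pairwise (S : List (List Int)) (a : Int) :
    List.Pairwise (fun p q => (toLex p.1 : Lex (Int × Int)) < toLex q.1) (pvEntList S a) := by
  by_cases han : a < (S.length : Int)
  · have hstep : pvEntList S a
        = (PySem.List.pyRange (a + 1) (S.length : Int)).filterMap (pvEnt S a) ++ pvEntList S (a + 1) := by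
      unfold pvEntList
      rw [PySem.List.pyRange_one_cons han, List.flatMap_cons]
    rw [hstep, List.pairwise_append]
    refine ⟨?_, pv_entList_pairwise S (a + 1), ?_⟩
    · rw [List.pairwise_filterMap]
      refine (pv_pyRange_pairwise (a + 1) (S.length : Int)).imp ?_
      intro j j' hjj p hp p' hp'
      rw [pv_ent_shape S a j p hp, pv_ent_shape S a j' p' hp']
      rw [Prod.Lex.toLex_lt_toLex]
      exact Or.inr ⟨rfl, hjj⟩
    · intro p hp q hq
      obtain ⟨j, hj, hent⟩ := List.mem_filterMap.mp hp
      have hq1 := (pv_entList_key_mem S (a + 1) q hq).1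
      rw [pv_ent_shape S a j p hent, Prod.Lex.toLex_lt_toLex]
      exact Or.inl (by simpa using by omega)
  · unfold pvEntList
    rw [PySem.List.pyRange_one_eq_nil (by omega)]
    constructor
termination_by ((S.length : Int) - a).toNat
decreasing_by all_goals simp_wf; omega

theorem pv_A_eq (S : List (List Int)) (order : List Int) :
    crossing_bisector_violations S order
      = (List.foldl (pvEntStep order) (some []) (pvEntList S 0)).getD [] := by
  obtain ⟨phi, h1, h2⟩ := pv_phi_items S
  have hs : PySem.List.sorted phi.items (fun p => (toLex p.1 : Lex (Int × Int))) = pvEntList S 0 := by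
    rw [h2]
    exact PySem.List.sorted_eq_of_perm_of_pairwise_lt _ _ _ (List.Perm.refl _)
      (pv_entList_pairwise S 0)
  unfold crossing_bisector_violations
  rw [h1]
  show (List.foldl (fun oacc p => oacc.bind fun acc =>
      (pvChordsCrossA p.1 p.2 order).map (fun cr => if cr then acc else acc ++ [p]))
      (some []) (PySem.List.sorted phi.items fun p => (toLex p.1 : Lex (Int × Int)))).getD [] = _
  rw [hs]
  rfl

-- ===== B-side characterization =====
-- the flat event stream of B's first loop: one (label, index) event per distinct label per row
def pvEvents1 (S : List (List Int)) : List (Int × Int) :=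
  (PySem.List.enumerate S).flatMap (fun p => (PySem.Set.ofList p.2).map (fun x => (x, p.1)))

-- the occurrence list B accumulates for label x
def pvOccList (S : List (List Int)) (x : Int) : List Int :=
  ((pvEvents1 S).filter (fun q => q.1 == x)).map (·.2)

-- all index pairs B generates from one occurrence list
def pvPairsIdx (idxs : List Int) : List (Int × Int) :=
  (PySem.List.pyRange 0 (idxs.length : Int)).flatMap (fun a =>
    (PySem.List.pyRange (a + 1) (idxs.length : Int)).map (fun b =>
      (PySem.List.pyGetD idxs a 0, PySem.List.pyGetD idxs b 0)))

-- the flat event stream of B's second loop: one (pair, label) event per generated pair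
def pvEvents2 (S : List (List Int)) : List ((Int × Int) × Int) :=
  (PySem.List.sorted (pvOccB S).keys (fun x => x)).flatMap
    (fun x => (pvPairsIdx (pvOccList S x)).map (fun pr => (pr, x)))


-- the pair list with full shared-label values, in lexicographic order
def pvPairList (S : List (List Int)) (a : Int) : List ((Int × Int) × List Int) :=
  (PySem.List.pyRange a (S.length : Int)).flatMap (fun i =>
    (PySem.List.pyRange (i + 1) (S.length : Int)).filterMap (fun j =>
      if pvInterA S i j = [] then none else some ((i, j), pvInterA S i j)))

theorem pv_occB_eq (S : List (List Int)) :
    pvOccB S = (pvEvents1 S).foldl (fun d q => d.modify q.1 [] (fun l => l ++ [q.2])) PySem.Dict.empty := by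
  unfold pvOccB pvEvents1
  rw [List.foldl_flatMap]
  congr 1
  funext d p
  rw [List.foldl_map]

theorem pv_occ_getD (S : List (List Int)) (x : Int) :
    (pvOccB S).getD x [] = pvOccList S x := by
  rw [pv_occB_eq]
  unfold pvOccList
  simpa using PySem.Dict.getD_foldl_modify_append (pvEvents1 S) PySem.Dict.empty x

theorem pv_occ_keys (S : List (List Int)) :
    (pvOccB S).keys = PySem.Set.ofList ((pvEvents1 S).map (fun q => q.1)) := by
  rw [pv_occB_eq,
    PySem.Dict.keys_foldl_modify_key (pvEvents1 S) (fun q => q.1) [] (fun _ q => (fun l => l ++ [q.2]))]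
  simp [PySem.Set.update_nil_left]

theorem pv_mem_events1 (S : List (List Int)) (q : Int × Int) :
    q ∈ pvEvents1 S ↔ ∃ k : Nat, ∃ _h : k < S.length, q.2 = (k : Int) ∧ q.1 ∈ S[k] := by
  unfold pvEvents1
  simp only [List.mem_flatMap, PySem.List.mem_enumerate_iff, List.mem_map, PySem.Set.mem_ofList]
  constructor
  · rintro ⟨p, ⟨k, hk, rfl⟩, ⟨x, hx, rfl⟩⟩
    exact ⟨k, hk, by simp, by simpa using hx⟩
  · rintro ⟨k, hk, h2, h1⟩
    exact ⟨((k : Int), S[k]), ⟨k, hk, by simp⟩, q.1, h1, by cases q with | mk a b => simp_all⟩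

theorem pv_occ_keys_mem (S : List (List Int)) (x : Int) :
    x ∈ (pvOccB S).keys ↔ ∃ k : Nat, ∃ _h : k < S.length, x ∈ S[k] := by
  rw [pv_occ_keys, PySem.Set.mem_ofList, List.mem_map]
  constructor
  · rintro ⟨q, hq, rfl⟩
    obtain ⟨k, hk, _, h1⟩ := (pv_mem_events1 S q).mp hq
    exact ⟨k, hk, h1⟩
  · rintro ⟨k, hk, h1⟩
    exact ⟨(x, (k : Int)), (pv_mem_events1 S (x, (k : Int))).mpr ⟨k, hk, rfl, h1⟩, rfl⟩

theorem pv_occ_keys_nodup (S : List (List Int)) : (pvOccB S).keys.Nodup := by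
  rw [pv_occ_keys]
  exact PySem.Set.nodup_ofList _

theorem pv_mem_occList (S : List (List Int)) (x i : Int) :
    i ∈ pvOccList S x ↔ ∃ k : Nat, ∃ _h : k < S.length, i = (k : Int) ∧ x ∈ S[k] := by
  unfold pvOccList
  simp only [List.mem_map, List.mem_filter, beq_iff_eq]
  constructor
  · rintro ⟨q, ⟨hq, hx⟩, rfl⟩
    obtain ⟨k, hk, h2, h1⟩ := (pv_mem_events1 S q).mp hq
    exact ⟨k, hk, h2, hx ▸ h1⟩
  · rintro ⟨k, hk, rfl, h1⟩
    exact ⟨(x, (k : Int)), ⟨(pv_mem_events1 S (x, (k : Int))).mpr ⟨k, hk, rfl, h1⟩, rfl⟩, rfl⟩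

theorem pv_events1_pairwise (S : List (List Int)) :
    (pvEvents1 S).Pairwise (fun q r => q.1 = r.1 → q.2 < r.2) := by
  unfold pvEvents1
  rw [List.pairwise_flatMap]
  constructor
  · intro p _
    rw [List.pairwise_map]
    refine (PySem.Set.nodup_ofList p.2).imp ?_
    intro a b hab h
    exact absurd (by simpa using h) hab
  · refine (PySem.List.pairwise_lt_enumerate S 0).imp ?_
    intro p q hpq u hu v hv _
    obtain ⟨a, _, rfl⟩ := List.mem_map.mp hu
    obtain ⟨b, _, rfl⟩ := List.mem_map.mp hv
    simpa using hpq

theorem pv_occList_pairwise (S : List (List Int)) (x : Int) :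
    List.Pairwise (· < ·) (pvOccList S x) := by
  unfold pvOccList
  rw [List.pairwise_map]
  have hf := (pv_events1_pairwise S).filter (fun q => q.1 == x)
  refine List.Pairwise.imp_of_mem ?_ hf
  intro a b ha hb hR
  rw [List.mem_filter, beq_iff_eq] at ha hb
  exact hR (ha.2.trans hb.2.symm)

theorem pv_get_lt (idxs : List Int) (h : List.Pairwise (· < ·) idxs) (a b : Int)
    (h0 : 0 ≤ a) (hab : a < b) (hb : b < (idxs.length : Int)) :
    PySem.List.pyGetD idxs a 0 < PySem.List.pyGetD idxs b 0 := by
  rw [PySem.List.pyGetD_eq_getElem idxs 0 h0 (by omega),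
    PySem.List.pyGetD_eq_getElem idxs 0 (by omega) hb]
  exact (List.pairwise_iff_getElem.mp h) a.toNat b.toNat (by omega) (by omega) (by omega)

theorem pv_mem_pairsIdx (idxs : List Int) (h : List.Pairwise (· < ·) idxs) (pr : Int × Int) :
    pr ∈ pvPairsIdx idxs ↔ pr.1 ∈ idxs ∧ pr.2 ∈ idxs ∧ pr.1 < pr.2 := by
  unfold pvPairsIdx
  simp only [List.mem_flatMap, List.mem_map, PySem.List.mem_pyRange_one]
  constructor
  · rintro ⟨a, ⟨ha0, haL⟩, b, ⟨hb0, hbL⟩, rfl⟩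
    have hga := PySem.List.pyGetD_eq_getElem idxs (i := a) 0 ha0 haL
    have hgb := PySem.List.pyGetD_eq_getElem idxs (i := b) 0 (by omega) hbL
    refine ⟨?_, ?_, pv_get_lt idxs h a b ha0 (by omega) hbL⟩
    · rw [hga]; exact List.getElem_mem _
    · rw [hgb]; exact List.getElem_mem _
  · rintro ⟨h1, h2, hlt⟩
    obtain ⟨k, hk, hk1⟩ := List.mem_iff_getElem.mp h1
    obtain ⟨m, hm, hm1⟩ := List.mem_iff_getElem.mp h2
    have hkm : k < m := by
      rcases Nat.lt_trichotomy k m with hkm | rfl | hmk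
      · exact hkm
      · exfalso
        rw [hk1] at hm1
        omega
      · exfalso
        have hlt2 := (List.pairwise_iff_getElem.mp h) m k hm hk hmk
        rw [hk1, hm1] at hlt2
        omega
    refine ⟨(k : Int), ⟨by omega, by exact_mod_cast hk⟩, (m : Int), ⟨by exact_mod_cast hkm, by exact_mod_cast hm⟩, ?_⟩
    have hga := PySem.List.pyGetD_eq_getElem idxs (i := (k : Int)) 0 (by omega) (by exact_mod_cast hk)
    have hgb := PySem.List.pyGetD_eq_getElem idxs (i := (m : Int)) 0 (by omega) (by exact_mod_cast hm)
    cases pr with | mk u v =>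
      simp only at hk1 hm1
      simp [hga, hgb, Int.toNat_natCast, hk1, hm1]

theorem pv_pairsIdx_pairwise (idxs : List Int) (h : List.Pairwise (· < ·) idxs) :
    (pvPairsIdx idxs).Pairwise (fun p q => (toLex p : Lex (Int × Int)) < toLex q) := by
  unfold pvPairsIdx
  rw [List.pairwise_flatMap]
  constructor
  · intro a ha
    rw [PySem.List.mem_pyRange_one] at ha
    rw [List.pairwise_map]
    refine (pv_pyRange_pairwise (a + 1) (idxs.length : Int)).imp_of_mem ?_
    intro b b' hb hb' hbb
    rw [PySem.List.mem_pyRange_one] at hb hb'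
    rw [Prod.Lex.toLex_lt_toLex]
    exact Or.inr ⟨rfl, pv_get_lt idxs h b b' (by omega) hbb hb'.2⟩
  · refine (pv_pyRange_pairwise 0 (idxs.length : Int)).imp_of_mem ?_
    intro a a' ha ha' haa u hu v hv
    rw [PySem.List.mem_pyRange_one] at ha ha'
    obtain ⟨b, hb, rfl⟩ := List.mem_map.mp hu
    obtain ⟨b', hb', rfl⟩ := List.mem_map.mp hv
    rw [PySem.List.mem_pyRange_one] at hb hb'
    rw [Prod.Lex.toLex_lt_toLex]
    exact Or.inl (pv_get_lt idxs h a a' ha.1 haa ha'.2)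

theorem pv_pairsIdx_nodup (idxs : List Int) (h : List.Pairwise (· < ·) idxs) :
    (pvPairsIdx idxs).Nodup := by
  exact (pv_pairsIdx_pairwise idxs h).imp (fun hlt => by
    intro he; rw [he] at hlt; exact lt_irrefl _ hlt)

theorem pv_sharedB_eq (S : List (List Int)) :
    pvSharedB S = (pvEvents2 S).foldl (fun d q => d.modify q.1 [] (fun l => l ++ [q.2])) PySem.Dict.empty := by
  unfold pvSharedB pvEvents2 pvPairsIdx
  simp only [pv_occ_getD, List.foldl_flatMap, List.foldl_map]

theorem pv_filter_beq_nodup {a : Type} [BEq a] [LawfulBEq a] (l : List a) (hn : l.Nodup) (c : a) :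
    l.filter (fun x => x == c) = if c ∈ l then [c] else [] := by
  induction l with
  | nil => simp
  | cons x xs ih =>
    rw [List.filter_cons]
    by_cases hx : x = c
    · subst hx
      have hnx : x ∉ xs := (List.nodup_cons.mp hn).1
      have : xs.filter (fun y => y == x) = [] := by
        rw [List.filter_eq_nil_iff]
        intro b hb hbx
        exact hnx ((beq_iff_eq.mp hbx) ▸ hb)
      simp [this]
    · have hb : (x == c) = false := by simpa using hx
      have hmem : (c ∈ x :: xs) ↔ c ∈ xs := by
        simp only [List.mem_cons]
        exact or_iff_right (fun h => hx h.symm)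
      simp only [hb, Bool.false_eq_true, if_false, ih (List.nodup_cons.mp hn).2]
      by_cases hc : c ∈ xs <;> simp [hmem, hc]

theorem pv_flatMap_if (l : List Int) (p : Int → Bool) :
    l.flatMap (fun x => if p x then [x] else []) = l.filter p := by
  induction l with
  | nil => rfl
  | cons x xs ih =>
    rw [List.flatMap_cons, List.filter_cons, ih]
    by_cases h : p x <;> simp [h]

theorem pv_shared_getD (S : List (List Int)) (pr : Int × Int) :
    (pvSharedB S).getD pr []
      = (PySem.List.sorted (pvOccB S).keys (fun x => x)).filter
          (fun x => decide (pr ∈ pvPairsIdx (pvOccList S x))) := by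
  rw [pv_sharedB_eq]
  rw [show ((pvEvents2 S).foldl (fun d q => d.modify q.1 [] (fun l => l ++ [q.2])) PySem.Dict.empty).getD pr []
      = PySem.Dict.empty.getD pr [] ++ ((pvEvents2 S).filter (fun q => q.1 == pr)).map (fun q => q.2)
    from PySem.Dict.getD_foldl_modify_append (pvEvents2 S) PySem.Dict.empty pr]
  rw [PySem.Dict.getD_empty, List.nil_append]
  unfold pvEvents2
  rw [List.filter_flatMap, List.map_flatMap]
  rw [← pv_flatMap_if]
  congr 1
  funext x
  rw [List.filter_map]
  have hcomp : ((fun q : (Int × Int) × Int => q.1 == pr) ∘ fun pr' => (pr', x)) = fun pr' => pr' == pr := rfl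
  rw [hcomp, List.map_map]
  rw [pv_filter_beq_nodup _ (pv_pairsIdx_nodup _ (pv_occList_pairwise S x)) pr]
  by_cases h : pr ∈ pvPairsIdx (pvOccList S x) <;> simp [h]

theorem pv_shared_keys (S : List (List Int)) :
    (pvSharedB S).keys = PySem.Set.ofList ((pvEvents2 S).map (fun q => q.1)) := by
  rw [pv_sharedB_eq,
    PySem.Dict.keys_foldl_modify_key (pvEvents2 S) (fun q => q.1) [] (fun _ q => (fun l => l ++ [q.2]))]
  simp [PySem.Set.update_nil_left]

theorem pv_shared_keys_nodup (S : List (List Int)) : (pvSharedB S).keys.Nodup := by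
  rw [pv_shared_keys]
  exact PySem.Set.nodup_ofList _

theorem pv_shared_keys_mem (S : List (List Int)) (pr : Int × Int) :
    pr ∈ (pvSharedB S).keys ↔ ∃ x, x ∈ (pvOccB S).keys ∧ pr ∈ pvPairsIdx (pvOccList S x) := by
  rw [pv_shared_keys, PySem.Set.mem_ofList, List.mem_map]
  unfold pvEvents2
  constructor
  · rintro ⟨q, hq, rfl⟩
    obtain ⟨x, hx, hq2⟩ := List.mem_flatMap.mp hq
    obtain ⟨pr', hpr', rfl⟩ := List.mem_map.mp hq2
    exact ⟨x, (PySem.List.mem_sorted _ _ _ _).mp hx, hpr'⟩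
  · rintro ⟨x, hx, hpr⟩
    exact ⟨(pr, x), List.mem_flatMap.mpr
      ⟨x, (PySem.List.mem_sorted _ _ _ _).mpr hx, List.mem_map.mpr ⟨pr, hpr, rfl⟩⟩, rfl⟩

theorem pv_shared_getD_inter (S : List (List Int)) (i j : Int)
    (hi : 0 ≤ i) (hj : i < j) (hn : j < (S.length : Int)) :
    (pvSharedB S).getD (i, j) [] = pvInterA S i j := by
  rw [pv_shared_getD]
  refine pv_strict_sorted_eq _ _ ?_ (pv_interA_pairwise S i j) ?_
  · exact (pv_sorted_strict _ (pv_occ_keys_nodup S)).filter _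
  · intro z
    rw [List.mem_filter, PySem.List.mem_sorted, decide_eq_true_iff,
      pv_mem_pairsIdx _ (pv_occList_pairwise S z), pv_occ_keys_mem,
      pv_mem_occList, pv_mem_occList, pv_interA_mem]
    have hgi : PySem.List.pyGetD S i [] = S[i.toNat]'(by omega) :=
      PySem.List.pyGetD_eq_getElem S [] hi (by omega)
    have hgj : PySem.List.pyGetD S j [] = S[j.toNat]'(by omega) :=
      PySem.List.pyGetD_eq_getElem S [] (by omega) hn
    constructor
    · rintro ⟨-, ⟨k, hk, hik, hzi⟩, ⟨m, hm, hjm, hzj⟩, -⟩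
      constructor
      · rw [hgi]
        simpa [show i.toNat = k from by omega] using hzi
      · rw [hgj]
        simpa [show j.toNat = m from by omega] using hzj
    · rintro ⟨hzi, hzj⟩
      rw [hgi] at hzi; rw [hgj] at hzj
      refine ⟨⟨i.toNat, by omega, hzi⟩, ⟨i.toNat, by omega, by omega, hzi⟩,
        ⟨j.toNat, by omega, by omega, hzj⟩, hj⟩

theorem pv_mem_pairList (S : List (List Int)) (p : (Int × Int) × List Int) :
    p ∈ pvPairList S 0 ↔ ∃ i j : Int, 0 ≤ i ∧ i < j ∧ j < (S.length : Int) ∧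
      pvInterA S i j ≠ [] ∧ p = ((i, j), pvInterA S i j) := by
  unfold pvPairList
  simp only [List.mem_flatMap, List.mem_filterMap, PySem.List.mem_pyRange_one]
  constructor
  · rintro ⟨i, ⟨hi0, hiL⟩, j, ⟨hj0, hjL⟩, hp⟩
    split at hp
    · cases hp
    · rename_i hne
      cases hp
      exact ⟨i, j, hi0, by omega, hjL, hne, rfl⟩
  · rintro ⟨i, j, hi0, hij, hjL, hne, rfl⟩
    exact ⟨i, ⟨hi0, by omega⟩, j, ⟨by omega, hjL⟩, by rw [if_neg hne]⟩

theorem pv_pairList_key_mem (S : List (List Int)) (a : Int) :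
    ∀ p ∈ pvPairList S a, a ≤ p.1.1 ∧ p.1.1 < p.1.2 := by
  intro p hp
  obtain ⟨i, hi, hp2⟩ := List.mem_flatMap.mp hp
  obtain ⟨j, hj, hent⟩ := List.mem_filterMap.mp hp2
  rw [PySem.List.mem_pyRange_one] at hi hj
  split at hent
  · cases hent
  · cases hent
    simp only
    omega

theorem pv_pairList_pairwise (S : List (List Int)) (a : Int) :
    List.Pairwise (fun p q => (toLex p.1 : Lex (Int × Int)) < toLex q.1) (pvPairList S a) := by
  by_cases han : a < (S.length : Int)
  · have hstep : pvPairList S a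
        = (PySem.List.pyRange (a + 1) (S.length : Int)).filterMap
            (fun j => if pvInterA S a j = [] then none else some ((a, j), pvInterA S a j))
          ++ pvPairList S (a + 1) := by
      unfold pvPairList
      rw [PySem.List.pyRange_one_cons han, List.flatMap_cons]
    rw [hstep, List.pairwise_append]
    refine ⟨?_, pv_pairList_pairwise S (a + 1), ?_⟩
    · rw [List.pairwise_filterMap]
      refine (pv_pyRange_pairwise (a + 1) (S.length : Int)).imp ?_
      intro j j' hjj p hp p' hp'
      split at hp
      · cases hp
      · cases hp
        split at hp'
        · cases hp'
        · cases hp'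
          rw [Prod.Lex.toLex_lt_toLex]
          exact Or.inr ⟨rfl, hjj⟩
    · intro p hp q hq
      obtain ⟨j, hj, hent⟩ := List.mem_filterMap.mp hp
      have hq1 := (pv_pairList_key_mem S (a + 1) q hq).1
      split at hent
      · cases hent
      · cases hent
        rw [Prod.Lex.toLex_lt_toLex]
        exact Or.inl (by simpa using by omega)
  · unfold pvPairList
    rw [PySem.List.pyRange_one_eq_nil (by omega)]
    constructor
termination_by ((S.length : Int) - a).toNat
decreasing_by all_goals simp_wf; omega

theorem pv_sorted_items_eq (S : List (List Int)) :
    PySem.List.sorted (pvSharedB S).items (fun p => (toLex p.1 : Lex (Int × Int)))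
      = pvPairList S 0 := by
  refine PySem.List.sorted_eq_of_perm_of_pairwise_lt _ _ _ ?_ (pv_pairList_pairwise S 0)
  have hnod1 : (pvPairList S 0).Nodup :=
    (pv_pairList_pairwise S 0).imp (fun hlt he => by rw [he] at hlt; exact lt_irrefl _ hlt)
  have hnod2 : (pvSharedB S).items.Nodup := by
    have : ((pvSharedB S).items.map Prod.fst).Nodup := pv_shared_keys_nodup S
    exact this.of_map
  rw [List.perm_ext_iff_of_nodup hnod1 hnod2]
  intro p
  rw [pv_mem_pairList]
  rw [PySem.Dict.items_eq_map_keys (pvSharedB S) (pv_shared_keys_nodup S) [], List.mem_map]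
  constructor
  · rintro ⟨i, j, hi0, hij, hjL, hne, rfl⟩
    refine ⟨(i, j), ?_, ?_⟩
    · rw [pv_shared_keys_mem]
      obtain ⟨z, hz⟩ := List.exists_mem_of_ne_nil _ hne
      have hz2 := (pv_interA_mem S i j z).mp hz
      have hgi : PySem.List.pyGetD S i [] = S[i.toNat]'(by omega) :=
        PySem.List.pyGetD_eq_getElem S [] hi0 (by omega)
      have hgj : PySem.List.pyGetD S j [] = S[j.toNat]'(by omega) :=
        PySem.List.pyGetD_eq_getElem S [] (by omega) hjL
      refine ⟨z, ?_, ?_⟩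
      · rw [pv_occ_keys_mem]
        exact ⟨i.toNat, by omega, by rw [← hgi]; exact hz2.1⟩
      · rw [pv_mem_pairsIdx _ (pv_occList_pairwise S z)]
        refine ⟨?_, ?_, hij⟩
        · rw [pv_mem_occList]
          exact ⟨i.toNat, by omega, by omega, by rw [← hgi]; exact hz2.1⟩
        · rw [pv_mem_occList]
          exact ⟨j.toNat, by omega, by omega, by rw [← hgj]; exact hz2.2⟩
    · rw [pv_shared_getD_inter S i j hi0 hij hjL]
  · rintro ⟨k, hk, rfl⟩
    rw [pv_shared_keys_mem] at hk
    obtain ⟨x, hx, hprs⟩ := hk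
    rw [pv_mem_pairsIdx _ (pv_occList_pairwise S x)] at hprs
    obtain ⟨h1, h2, hlt⟩ := hprs
    rw [pv_mem_occList] at h1 h2
    obtain ⟨ki, hki, hik, hxi⟩ := h1
    obtain ⟨kj, hkj, hjk, hxj⟩ := h2
    have hi0 : 0 ≤ k.1 := by omega
    have hjL : k.2 < (S.length : Int) := by omega
    have hgi : PySem.List.pyGetD S k.1 [] = S[k.1.toNat]'(by omega) :=
      PySem.List.pyGetD_eq_getElem S [] hi0 (by omega)
    have hgj : PySem.List.pyGetD S k.2 [] = S[k.2.toNat]'(by omega) :=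
      PySem.List.pyGetD_eq_getElem S [] (by omega) hjL
    have hne : pvInterA S k.1 k.2 ≠ [] := by
      intro hnil
      have : x ∈ pvInterA S k.1 k.2 := by
        rw [pv_interA_mem]
        constructor
        · rw [hgi]
          simpa [show k.1.toNat = ki from by omega] using hxi
        · rw [hgj]
          simpa [show k.2.toNat = kj from by omega] using hxj
      rw [hnil] at this
      simp at this
    refine ⟨k.1, k.2, hi0, hlt, hjL, hne, ?_⟩
    rw [pv_shared_getD_inter S k.1 k.2 hi0 hlt hjL]

theorem pv_B_eq (S : List (List Int)) (order : List Int) :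
    crossing_bisector_violations_alt S order
      = (List.foldl (pvEntStep order) (some []) (pvEntList S 0)).getD [] := by
  unfold crossing_bisector_violations_alt
  simp only [pv_sorted_items_eq]
  congr 1
  unfold pvPairList pvEntList
  rw [List.foldl_flatMap, List.foldl_flatMap]
  refine PySem.List.foldl_congr_mem _ _ _ _ ?_
  intro oacc i hi
  rw [List.foldl_filterMap, List.foldl_filterMap]
  refine PySem.List.foldl_congr_mem _ _ _ _ ?_
  intro oacc2 j hj
  rw [PySem.List.mem_pyRange_one] at hi hj
  by_cases h0 : pvInterA S i j = []
  · have hl : pvEnt S i j = none := by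
      unfold pvEnt
      rw [if_neg (by rw [h0]; simp)]
    rw [if_pos h0, hl]
  · rw [if_neg h0]
    unfold pvEnt
    by_cases h2 : (pvInterA S i j).length = 2
    · rw [if_pos h2]
      simp only
      have hxy := pv_getD2_lt _ (pv_interA_pairwise S i j) h2
      rw [pv_cross_eq i j _ _ order (by omega) hxy]
      unfold pvEntStep
      cases oacc2 with
      | none => rfl
      | some acc =>
        simp only [h2, if_pos, Option.bind_some, Option.map_map]
        congr 1
        funext cr
        cases cr <;> rfl
    · rw [if_neg h2]
      simp only [h2, if_false]
      cases oacc2 <;> rfl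

-- ===== VERDICT (by name: the statement is the Claim_ definition above) =====
theorem crossing_bisector_violations_spec : Claim_equal_crossing_bisector_violations := by
  intro S order _ _
  unfold Spec_crossing_bisector_violations
  rw [pv_A_eq, pv_B_eq]
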